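-- pv_equiv track=rewrite | github.com/technion-cs-nlp/nlp4aja | pytorch/run.py | prepare_tag_dict
-- ===== SOURCE A (Python) =====
-- UNKNOWN = 'UNKNOWN'
--
-- def prepare_tag_dict(training_data):
--     tag_to_ix = {}
--     for sent, tags in training_data:
--         for word_bpe, tag in zip(sent, tags):
--             if tag not in tag_to_ix:
--                 tag_to_ix[tag] = len(tag_to_ix)
--
--     if UNKNOWN not in tag_to_ix:
--         tag_to_ix[UNKNOWN] = len(tag_to_ix)
--
--     return tag_to_ix
-- ===== SOURCE B (Python) =====
-- UNKNOWN = 'UNKNOWN'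
--
-- def prepare_tag_dict(training_data):
--     # Flatten to the stream of tags (zip-truncated), extend with UNKNOWN if absent,
--     # then compute each first-occurrence's index as the number of distinct tags
--     # strictly before it -- no running dict/counter is maintained.
--     xs = [tag for sent, tags in training_data for _, tag in zip(sent, tags)]
--     if UNKNOWN not in xs:
--         xs = xs + [UNKNOWN]
--     return {t: len(set(xs[:i])) for i, t in enumerate(xs) if t not in xs[:i]}
-- ===== Notes on version B (the rewrite author's own statement) =====
-- stated objective: alternative
-- what changed: B maintains no incremental dict or counter: it flattens the tag stream (appending UNKNOWN if absent) and computes each tag's index non-incrementally as the number of distinct tags in the prefix strictly before its first occurrence, trading A's linear single pass for quadratic prefix recomputation.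
import Mathlib
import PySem

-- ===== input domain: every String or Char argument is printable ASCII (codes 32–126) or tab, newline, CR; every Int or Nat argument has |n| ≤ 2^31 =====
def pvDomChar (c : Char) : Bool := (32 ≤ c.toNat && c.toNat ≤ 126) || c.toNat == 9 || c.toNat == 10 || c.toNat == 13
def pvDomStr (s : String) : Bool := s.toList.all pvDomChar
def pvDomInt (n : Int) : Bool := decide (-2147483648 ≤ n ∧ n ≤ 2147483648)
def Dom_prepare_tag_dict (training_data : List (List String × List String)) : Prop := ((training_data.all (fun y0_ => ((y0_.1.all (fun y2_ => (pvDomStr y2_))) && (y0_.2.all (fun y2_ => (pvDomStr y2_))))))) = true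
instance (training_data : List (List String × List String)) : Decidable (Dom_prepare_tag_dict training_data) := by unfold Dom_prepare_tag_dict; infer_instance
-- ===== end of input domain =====

-- B keeps no incremental dict/counter: it flattens the tag stream (UNKNOWN appended if absent)
-- and computes each first occurrence's index as the number of distinct tags in the prefix before it.


-- ===== PORT A =====
-- tag_to_ix = {}; for sent, tags: for word_bpe, tag in zip(sent, tags): if tag not in d: d[tag] = len(d)
-- then if UNKNOWN not in d: d[UNKNOWN] = len(d); return d
def prepare_tag_dict (training_data : List (List String × List String)) : List (String × Int) :=
  let tag_to_ix : PySem.Dict String Int :=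
    training_data.foldl
      (fun d p =>
        (p.1.zip p.2).foldl
          (fun d wt => if d.contains wt.2 then d else d.insert wt.2 (d.size : Int)) d)
      PySem.Dict.empty
  let tag_to_ix :=
    if tag_to_ix.contains "UNKNOWN" then tag_to_ix
    else tag_to_ix.insert "UNKNOWN" (tag_to_ix.size : Int)
  tag_to_ix.items

-- ===== PORT B =====
-- xs = [tag for sent, tags in td for _, tag in zip(sent, tags)]; if UNKNOWN not in xs: xs = xs + [UNKNOWN]
-- {t: len(set(xs[:i])) for i, t in enumerate(xs) if t not in xs[:i]}
-- (the keys passing the filter are pairwise distinct first occurrences, so the dict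
--  comprehension's items in insertion order are exactly this filtered map)
def prepare_tag_dict_alt (training_data : List (List String × List String)) : List (String × Int) :=
  let xs := training_data.flatMap (fun p => (p.1.zip p.2).map (·.2))
  let xs := if xs.contains "UNKNOWN" then xs else xs ++ ["UNKNOWN"]
  ((PySem.List.enumerate xs 0).filter
      (fun p => !((PySem.List.slice xs none (some p.1)).contains p.2))).map
    (fun p => (p.2, ((PySem.Set.ofList (PySem.List.slice xs none (some p.1))).length : Int)))

-- ===== PRECONDITION & SPEC =====
def Spec_prepare_tag_dict (training_data : List (List String × List String)) (out : List (String × Int)) : Prop := out = prepare_tag_dict_alt training_data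
instance (training_data : List (List String × List String)) (out : List (String × Int)) : Decidable (Spec_prepare_tag_dict training_data out) := by unfold Spec_prepare_tag_dict; infer_instance

-- ===== CLAIM (what is proved, stated in full; the proofs are below) =====
def Claim_equal_prepare_tag_dict : Prop := ∀ (training_data : List (List String × List String)), Dom_prepare_tag_dict training_data → Spec_prepare_tag_dict training_data (prepare_tag_dict training_data)

-- ===== LEMMAS AND PROOFS =====

-- the dict A maintains, expressed as a function of the unique-tag list of the seen prefix
def dOf (u : List String) : PySem.Dict String Int :=
  PySem.Dict.mk ((PySem.List.enumerate u 0).map (fun p => (p.2, p.1)))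

lemma enumerate_append_singleton {α : Type} (u : List α) (x : α) (s : Int) :
    PySem.List.enumerate (u ++ [x]) s
      = PySem.List.enumerate u s ++ [(s + u.length, x)] := by
  induction u generalizing s with
  | nil => simp [PySem.List.enumerate]
  | cons a t ih =>
      simp [PySem.List.enumerate, ih]
      ring_nf

lemma contains_dOf_aux (u : List String) (x : String) (s : Int) :
    ((PySem.List.enumerate u s).any (fun p => p.2 == x)) = u.contains x := by
  induction u generalizing s with
  | nil => simp [PySem.List.enumerate]
  | cons a t ih =>
      rw [PySem.List.enumerate_cons, List.any_cons, ih (s+1), List.contains_cons]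
      simp [BEq.comm]

lemma contains_dOf (u : List String) (x : String) :
    (dOf u).contains x = u.contains x := by
  rw [← contains_dOf_aux u x 0]
  simp [dOf, PySem.Dict.contains, List.any_map, Function.comp_def]

lemma size_dOf (u : List String) : (dOf u).size = u.length := by
  simp [dOf, PySem.Dict.size, PySem.List.length_enumerate]

lemma step_dOf (u : List String) (x : String) :
    (if (dOf u).contains x then dOf u else (dOf u).insert x ((dOf u).size : Int))
      = dOf (PySem.Set.add u x) := by
  by_cases hm : x ∈ u
  · have h1 : (dOf u).contains x = true := by rw [contains_dOf]; simpa
    simp [PySem.Set.add, h1, hm]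
  · have h1 : (dOf u).contains x = false := by rw [contains_dOf]; simpa
    rw [if_neg (by simp [h1]), PySem.Set.add, if_neg (by simpa using hm)]
    simp only [PySem.Dict.insert, h1, Bool.false_eq_true, if_false, size_dOf]
    simp [dOf, enumerate_append_singleton]

lemma foldl_step_dOf (xs : List String) (u : List String) :
    xs.foldl (fun d t => if d.contains t then d else d.insert t (d.size : Int)) (dOf u)
      = dOf (xs.foldl PySem.Set.add u) := by
  induction xs generalizing u with
  | nil => rfl
  | cons t rest ih => simpa [step_dOf] using ih (PySem.Set.add u t)

-- B's comprehension with the prefix slices written as List.take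
def bTake (xs : List String) : List (String × Int) :=
  ((PySem.List.enumerate xs 0).filter
      (fun p => !((xs.take p.1.toNat).contains p.2))).map
    (fun p => (p.2, ((PySem.Set.ofList (xs.take p.1.toNat)).length : Int)))

lemma slice_prefix_eq_take (xs : List String) :
    ((PySem.List.enumerate xs 0).filter
        (fun p => !((PySem.List.slice xs none (some p.1)).contains p.2))).map
      (fun p => (p.2, ((PySem.Set.ofList (PySem.List.slice xs none (some p.1))).length : Int)))
      = bTake xs := by
  unfold bTake
  have hsl : ∀ p ∈ PySem.List.enumerate xs 0,
      PySem.List.slice xs none (some p.1) = xs.take p.1.toNat := by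
    intro p hp
    rcases (PySem.List.mem_enumerate_iff _ _ _).1 hp with ⟨k, hk, rfl⟩
    exact PySem.List.slice_to xs (by simp)
  rw [List.filter_congr (by intro p hp; rw [hsl p hp])]
  exact List.map_congr_left (by
    intro p hp
    rw [hsl p (List.mem_of_mem_filter hp)])

-- the key characterisation: B's prefix-counting comprehension enumerates the ordered uniques
lemma bTake_eq (xs : List String) :
    bTake xs = (PySem.List.enumerate (PySem.Set.ofList xs) 0).map (fun p => (p.2, p.1)) := by
  induction xs using List.reverseRecOn with
  | nil => rfl
  | append_singleton xs x ih =>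
      have hidx : ∀ p ∈ PySem.List.enumerate xs 0, p.1.toNat ≤ xs.length := by
        intro p hp
        rcases (PySem.List.mem_enumerate_iff _ _ _).1 hp with ⟨k, hk, rfl⟩
        simp; omega
      have htake : ∀ p ∈ PySem.List.enumerate xs 0,
          (xs ++ [x]).take p.1.toNat = xs.take p.1.toNat := by
        intro p hp
        exact List.take_append_of_le_length (hidx p hp)
      have hstep : bTake (xs ++ [x])
          = bTake xs ++ (if x ∈ xs then [] else [(x, ((PySem.Set.ofList xs).length : Int))]) := by
        unfold bTake
        rw [PySem.List.enumerate_append]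
        simp only [List.filter_append, List.map_append]
        congr 1
        · rw [List.filter_congr (by intro p hp; rw [htake p hp])]
          exact List.map_congr_left (by
            intro p hp
            rw [htake p (List.mem_of_mem_filter hp)])
        · simp only [PySem.List.enumerate, List.filter]
          have : ((xs ++ [x]).take ((0 : Int) + (xs.length : Int)).toNat) = xs := by
            simp
          rw [this]
          by_cases hm : x ∈ xs
          · simp [hm]
          · simp [hm]
      rw [hstep, ih]
      have hof : PySem.Set.ofList (xs ++ [x]) = PySem.Set.add (PySem.Set.ofList xs) x := by
        simp [PySem.Set.ofList_eq_foldl, List.foldl_append]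
      rw [hof]
      by_cases hm : x ∈ xs
      · have : PySem.Set.add (PySem.Set.ofList xs) x = PySem.Set.ofList xs := by
          simp [PySem.Set.add, PySem.Set.mem_ofList, hm]
        simp [hm]
      · have hnm : x ∉ PySem.Set.ofList xs := by simp [PySem.Set.mem_ofList, hm]
        have : PySem.Set.add (PySem.Set.ofList xs) x = PySem.Set.ofList xs ++ [x] := by
          simp [PySem.Set.add, hnm]
        rw [this, enumerate_append_singleton]
        simp [hm]

-- ===== VERDICT (by name: the statement is the Claim_ definition above) =====
theorem prepare_tag_dict_spec : Claim_equal_prepare_tag_dict := by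
  intro td _
  simp only [Spec_prepare_tag_dict, prepare_tag_dict, prepare_tag_dict_alt]
  have hflat :
      td.foldl
        (fun d p =>
          (p.1.zip p.2).foldl
            (fun d wt => if d.contains wt.2 then d else d.insert wt.2 (d.size : Int)) d)
        PySem.Dict.empty
      = (td.flatMap (fun p => (p.1.zip p.2).map (·.2))).foldl
          (fun d t => if d.contains t then d else d.insert t (d.size : Int))
          PySem.Dict.empty := by
    simp [List.flatMap, List.foldl_flatten, List.foldl_map]
  set xs0 := td.flatMap (fun p => (p.1.zip p.2).map (·.2)) with hxs0
  have hempty : (PySem.Dict.empty : PySem.Dict String Int) = dOf [] := rfl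
  rw [hflat, hempty, foldl_step_dOf, step_dOf]
  -- A's items are the enumerated uniques of the final flattened stream
  set xs := if xs0.contains "UNKNOWN" then xs0 else xs0 ++ ["UNKNOWN"] with hxs
  have hu : PySem.Set.add (xs0.foldl PySem.Set.add []) "UNKNOWN" = PySem.Set.ofList xs := by
    have h0 : xs0.foldl PySem.Set.add [] = PySem.Set.ofList xs0 := rfl
    rw [h0, hxs]
    split_ifs with hc
    · have hm : "UNKNOWN" ∈ PySem.Set.ofList xs0 := by
        simp [PySem.Set.mem_ofList]; simpa using hc
      simp [PySem.Set.add, hm]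
    · simp [PySem.Set.ofList_eq_foldl, List.foldl_append]
  rw [hu, slice_prefix_eq_take, bTake_eq]
  rfl
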